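-- pv_equiv track=rewrite | github.com/AgusGermii/snakes-ladders | TP1 2.0.py | hongos_locos
-- ===== SOURCE A (Python) =====
-- def crear_tablero() -> list:
--     """
--     > Crea un tablero con los valores del 1 al 10
--     """
--     tablero: list = []
--     n: int = 100
--     for i in range(10):
--         tablero.append([])
--         if n % 10 == 0:
--             for j in range(n, n - 10, - 1):
--                 tablero[i].append(j)
--             n -= 19
--         elif n % 10 != 0:
--             for j in range(n, n + 10, + 1):
--                 tablero[i].append(j)
--             n -= 1
--
--     return tablero
--
-- def hongos_locos(posicion: int) -> int:
--     """
--     > Si la posicion esta en el casillero HONGOS LOCOS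
--     > El jugador corre hasta la esquina de la parte DESCENDENTE del tablero
--     > Si posicion = 84 -> nueva posicion = 81
--
--     """
--     tablero: list = crear_tablero()
--     nueva_posicion: int = 0
--
--     for i in tablero:
--         if posicion in i:
--             if posicion >= i[0]:
--                 nueva_posicion = i[9]
--             elif posicion <= i[0]:
--                 nueva_posicion = i[0]
--     return nueva_posicion
--
--
--     return nueva_posicion
-- ===== SOURCE B (Python) =====
-- def hongos_locos(posicion: int) -> int:
--     if posicion not in range(1, 101):
--         return 0
--     r = (100 - posicion) // 10
--     top = 100 - 10 * r
--     if r % 2 == 0 and posicion == top: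
--         return top - 9
--     return top
-- ===== Notes on version B (the rewrite author's own statement) =====
-- stated objective: simpler
-- what changed: B drops crear_tablero and the row scan entirely and computes the target corner arithmetically from the position (row index r = (100-posicion)//10, top = 100-10*r, with the even-row top-of-row tie returning top-9), returning 0 off-board.
import Mathlib
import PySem

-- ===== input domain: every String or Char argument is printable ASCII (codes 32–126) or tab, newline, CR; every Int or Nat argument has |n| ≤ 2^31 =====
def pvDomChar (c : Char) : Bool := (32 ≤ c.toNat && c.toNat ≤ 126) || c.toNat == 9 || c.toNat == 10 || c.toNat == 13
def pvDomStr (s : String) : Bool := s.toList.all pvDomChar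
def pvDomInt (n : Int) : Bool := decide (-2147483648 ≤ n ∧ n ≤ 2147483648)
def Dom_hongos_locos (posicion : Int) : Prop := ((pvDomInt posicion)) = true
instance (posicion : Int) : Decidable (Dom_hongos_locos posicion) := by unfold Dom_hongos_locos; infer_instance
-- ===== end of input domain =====

-- B replaces the built 10×10 board and row scan by direct arithmetic on the position (simpler).

-- ===== PORT A =====
-- builds the snakes-and-ladders board row by row, alternating direction
def crear_tablero : List (List Int) :=
  (((PySem.List.pyRange 0 10 1).foldl (fun (st : List (List Int) × Int) _i =>
      let tablero := st.1
      let n := st.2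
      if PySem.Int.mod n 10 == 0 then
        (tablero ++ [PySem.List.pyRange n (n - 10) (-1)], n - 19)
      else
        (tablero ++ [PySem.List.pyRange n (n + 10) 1], n - 1))
    ([], 100))).1

def hongos_locos (posicion : Int) : Int :=
  crear_tablero.foldl (fun nueva_posicion i =>
    if posicion ∈ i then
      match PySem.List.pyGet? i 0, PySem.List.pyGet? i 9 with
      | some a, some b =>
        if posicion ≥ a then b
        else if posicion ≤ a then a
        else nueva_posicion
      | _, _ => nueva_posicion
    else nueva_posicion) 0

-- ===== PORT B =====
def hongos_locos_alt (posicion : Int) : Int :=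
  if 1 ≤ posicion ∧ posicion ≤ 100 then
    let r := PySem.Int.floordiv (100 - posicion) 10
    let top := 100 - 10 * r
    if PySem.Int.mod r 2 == 0 ∧ posicion == top then top - 9 else top
  else 0

-- ===== PRECONDITION & SPEC =====
def Spec_hongos_locos (posicion : Int) (out : Int) : Prop := out = hongos_locos_alt posicion
instance (posicion : Int) (out : Int) : Decidable (Spec_hongos_locos posicion out) := by unfold Spec_hongos_locos; infer_instance

-- ===== CLAIM (what is proved, stated in full; the proofs are below) =====
def Claim_equal_hongos_locos : Prop := ∀ (posicion : Int), Dom_hongos_locos posicion → Spec_hongos_locos posicion (hongos_locos posicion)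

-- ===== LEMMAS AND PROOFS =====
-- proof-only helper: hongos_locos with the board evaluated to its literal rows
def hl_spelled (posicion : Int) : Int :=
  [[(100:Int),99,98,97,96,95,94,93,92,91],
   [81,82,83,84,85,86,87,88,89,90],
   [80,79,78,77,76,75,74,73,72,71],
   [61,62,63,64,65,66,67,68,69,70],
   [60,59,58,57,56,55,54,53,52,51],
   [41,42,43,44,45,46,47,48,49,50],
   [40,39,38,37,36,35,34,33,32,31],
   [21,22,23,24,25,26,27,28,29,30],
   [20,19,18,17,16,15,14,13,12,11],
   [1,2,3,4,5,6,7,8,9,10]].foldl (fun nueva_posicion i =>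
    if posicion ∈ i then
      match PySem.List.pyGet? i 0, PySem.List.pyGet? i 9 with
      | some a, some b =>
        if posicion ≥ a then b
        else if posicion ≤ a then a
        else nueva_posicion
      | _, _ => nueva_posicion
    else nueva_posicion) 0

set_option maxHeartbeats 2000000 in
lemma crear_tablero_eq : crear_tablero =
    [[100,99,98,97,96,95,94,93,92,91],
     [81,82,83,84,85,86,87,88,89,90],
     [80,79,78,77,76,75,74,73,72,71],
     [61,62,63,64,65,66,67,68,69,70],
     [60,59,58,57,56,55,54,53,52,51],
     [41,42,43,44,45,46,47,48,49,50],
     [40,39,38,37,36,35,34,33,32,31],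
     [21,22,23,24,25,26,27,28,29,30],
     [20,19,18,17,16,15,14,13,12,11],
     [1,2,3,4,5,6,7,8,9,10]] := by decide

set_option maxHeartbeats 2000000 in
lemma hongos_locos_eq_spelled (posicion : Int) :
    hongos_locos posicion = hl_spelled posicion := by
  unfold hongos_locos hl_spelled
  rw [crear_tablero_eq]

lemma hl_foldl_nomem (p : Int) (rs : List (List Int)) (acc : Int)
    (h : ∀ r ∈ rs, p ∉ r) :
    rs.foldl (fun nueva_posicion i =>
      if p ∈ i then
        match PySem.List.pyGet? i 0, PySem.List.pyGet? i 9 with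
        | some a, some b =>
          if p ≥ a then b
          else if p ≤ a then a
          else nueva_posicion
        | _, _ => nueva_posicion
      else nueva_posicion) acc = acc := by
  induction rs generalizing acc with
  | nil => rfl
  | cons r rs ih =>
      rw [List.foldl_cons, if_neg (h r (by simp))]
      exact ih acc (fun r' hr' => h r' (List.mem_cons_of_mem _ hr'))

lemma hl_spelled_out (posicion : Int) (h : posicion < 1 ∨ 100 < posicion) :
    hl_spelled posicion = 0 := by
  unfold hl_spelled
  apply hl_foldl_nomem
  intro r hr
  fin_cases hr <;> simp only [List.mem_cons, List.not_mem_nil, or_false] <;> omega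

-- ===== VERDICT (by name: the statement is the Claim_ definition above) =====
set_option maxHeartbeats 2000000 in
theorem hongos_locos_spec : Claim_equal_hongos_locos := by
  intro posicion _
  unfold Spec_hongos_locos
  rw [hongos_locos_eq_spelled]
  by_cases h : 1 ≤ posicion ∧ posicion ≤ 100
  · obtain ⟨h1, h2⟩ := h
    interval_cases posicion <;> decide
  · rw [hl_spelled_out posicion (by omega)]
    unfold hongos_locos_alt
    rw [if_neg h]
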